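-- pv_equiv track=rewrite | github.com/DanielEftekhari/normality-normalization | configs/utils.py | product_with_map
-- ===== SOURCE A (Python) =====
-- import itertools
--
-- def product(d):
--     return list(itertools.product(*list(d.values())))
--
-- def product_with_map(d):
--     args = list(d.keys())
--     vals = product(d)
--     num_runs = len(vals)
--
--     res = {}
--     for id_ in range(num_runs):
--         cfg = vals[id_]
--         res[id_+1] = {args[j]: cfg[j] for j in range(len(args))}
--     return res
-- ===== SOURCE B (Python) =====
-- def product_with_map(d):
--     running = [{}]
--     for key, values in d.items():
--         running = [{**partial, key: v} for partial in running for v in values]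
--     return {i: cfg for i, cfg in enumerate(running, start=1)}
-- ===== Notes on version B (the rewrite author's own statement) =====
-- stated objective: simpler
-- what changed: Replaces itertools.product over positional tuples plus a positional index/dict-comprehension pass with a single left fold that extends partial config dicts key by key, then enumerates the finished dicts from 1.
import Mathlib
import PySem

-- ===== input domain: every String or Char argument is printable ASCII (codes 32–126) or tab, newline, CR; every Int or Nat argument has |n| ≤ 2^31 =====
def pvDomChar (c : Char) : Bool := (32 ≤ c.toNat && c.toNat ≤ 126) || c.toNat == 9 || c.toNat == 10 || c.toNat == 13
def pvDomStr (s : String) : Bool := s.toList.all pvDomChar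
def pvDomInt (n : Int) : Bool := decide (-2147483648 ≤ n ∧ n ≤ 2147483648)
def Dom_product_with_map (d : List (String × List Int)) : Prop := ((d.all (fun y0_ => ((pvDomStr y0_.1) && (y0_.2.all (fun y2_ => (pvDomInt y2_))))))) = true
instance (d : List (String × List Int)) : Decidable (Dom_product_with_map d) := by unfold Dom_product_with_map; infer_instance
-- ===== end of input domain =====

-- B changes the decomposition (a fold over keys extending partial dicts, then enumerate) — 'simpler'; same cost.

-- ===== PORT A =====
-- itertools.product(*lists) as the standard right-nested cartesian product (leftmost varies slowest)
def pvProdTuples (ls : List (List Int)) : List (List Int) :=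
  match ls with
  | [] => [[]]
  | l :: rest => l.flatMap (fun v => (pvProdTuples rest).map (fun t => v :: t))

def product_with_map (d : List (String × List Int)) : List (Int × List (String × Int)) :=
  let args := d.map Prod.fst
  let vals := pvProdTuples (d.map Prod.snd)
  let numRuns : Int := (vals.length : Int)
  let res := (PySem.List.pyRange 0 numRuns 1).foldl
    (fun (res : PySem.Dict Int (PySem.Dict String Int)) id_ =>
      let cfg := PySem.List.pyGetD vals id_ []
      res.insert (id_ + 1)
        ((PySem.List.pyRange 0 (args.length : Int) 1).foldl
          (fun (c : PySem.Dict String Int) j =>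
            c.insert (PySem.List.pyGetD args j "") (PySem.List.pyGetD cfg j 0))
          PySem.Dict.empty))
    PySem.Dict.empty
  res.items.map (fun p => (p.1, p.2.items))

-- ===== PORT B =====
def product_with_map_alt (d : List (String × List Int)) : List (Int × List (String × Int)) :=
  let running := d.foldl
    (fun (running : List (PySem.Dict String Int)) kv =>
      running.flatMap (fun partial_ => kv.2.map (fun v => partial_.insert kv.1 v)))
    [PySem.Dict.empty]
  (PySem.List.enumerate running 1).map (fun p => (p.1, p.2.items))

-- ===== PRECONDITION & SPEC =====
def Spec_product_with_map (d : List (String × List Int)) (out : List (Int × List (String × Int))) : Prop := out = product_with_map_alt d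
instance (d : List (String × List Int)) (out : List (Int × List (String × Int))) : Decidable (Spec_product_with_map d out) := by unfold Spec_product_with_map; infer_instance

-- ===== CLAIM (what is proved, stated in full; the proofs are below) =====
def Claim_equal_product_with_map : Prop := ∀ (d : List (String × List Int)), Dom_product_with_map d → Spec_product_with_map d (product_with_map d)

-- ===== LEMMAS AND PROOFS =====

-- all dicts reachable from one partial dict p by choosing one value per remaining key
def pvBuildAll (p : PySem.Dict String Int) (d : List (String × List Int)) : List (PySem.Dict String Int) :=
  match d with
  | [] => [p]
  | (k, vs) :: rest => vs.flatMap (fun v => pvBuildAll (p.insert k v) rest)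

def pvInsZip (p : PySem.Dict String Int) (pairs : List (String × Int)) : PySem.Dict String Int :=
  pairs.foldl (fun c q => c.insert q.1 q.2) p

theorem pvRunning_eq (d : List (String × List Int)) (acc : List (PySem.Dict String Int)) :
    d.foldl (fun running kv => running.flatMap (fun p => kv.2.map (fun v => p.insert kv.1 v))) acc
      = acc.flatMap (fun p => pvBuildAll p d) := by
  induction d generalizing acc with
  | nil => simp [pvBuildAll]
  | cons kv rest ih =>
    obtain ⟨k, vs⟩ := kv
    simp only [List.foldl_cons, ih, pvBuildAll, List.flatMap_assoc]
    simp [List.flatMap_map]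

theorem pvBuildAll_eq (d : List (String × List Int)) (p : PySem.Dict String Int) :
    pvBuildAll p d
      = (pvProdTuples (d.map Prod.snd)).map (fun cfg => pvInsZip p ((d.map Prod.fst).zip cfg)) := by
  induction d generalizing p with
  | nil => simp [pvBuildAll, pvProdTuples, pvInsZip]
  | cons kv rest ih =>
    obtain ⟨k, vs⟩ := kv
    simp only [pvBuildAll, pvProdTuples, List.map_cons]
    simp [ih, List.map_flatMap, List.map_map, pvInsZip, Function.comp_def, List.zip_cons_cons]

theorem pvProdTuples_length (ls : List (List Int)) (cfg : List Int) (h : cfg ∈ pvProdTuples ls) :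
    cfg.length = ls.length := by
  induction ls generalizing cfg with
  | nil => simp [pvProdTuples] at h; simp [h]
  | cons l rest ih =>
    simp only [pvProdTuples, List.mem_flatMap, List.mem_map] at h
    obtain ⟨v, _, t, ht, rfl⟩ := h
    simp [ih t ht]

theorem pvInner_eq (args : List String) (cfg : List Int) (hlen : cfg.length = args.length) :
    (PySem.List.pyRange 0 (args.length : Int) 1).foldl
        (fun (c : PySem.Dict String Int) j =>
          c.insert (PySem.List.pyGetD args j "") (PySem.List.pyGetD cfg j 0))
        PySem.Dict.empty
      = pvInsZip PySem.Dict.empty (args.zip cfg) := by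
  have hz : (args.zip cfg).length = args.length := by simp [hlen]
  rw [PySem.List.foldl_congr_mem _ _
        (fun (c : PySem.Dict String Int) j =>
          c.insert (PySem.List.pyGetD (args.zip cfg) j ("", 0)).1
            (PySem.List.pyGetD (args.zip cfg) j ("", 0)).2) _ ?_]
  · rw [show ((args.length : Int)) = ((args.zip cfg).length : Int) by rw [hz],
      PySem.List.foldl_pyRange_zero_pyGetD' (args.zip cfg) ("", 0)
        (fun (c : PySem.Dict String Int) q => c.insert q.1 q.2)]
    rfl
  · intro c j hj
    rw [PySem.List.mem_pyRange_one] at hj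
    obtain ⟨h0, h1⟩ := hj
    beta_reduce
    rw [PySem.List.pyGetD_eq_getElem args "" h0 h1,
      PySem.List.pyGetD_eq_getElem cfg 0 h0 (by omega),
      PySem.List.pyGetD_eq_getElem (args.zip cfg) ("", 0) h0 (by rw [hz]; exact h1)]
    simp

theorem pvEnumerate_shift {α : Type} (xs : List α) (s t : Int) :
    PySem.List.enumerate xs (s + t) = (PySem.List.enumerate xs s).map (fun p => (p.1 + t, p.2)) := by
  induction xs generalizing s with
  | nil => simp
  | cons x xs ih =>
    rw [PySem.List.enumerate_cons, PySem.List.enumerate_cons]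
    simp only [List.map_cons]
    rw [show s + t + 1 = (s + 1) + t by ring, ih]

theorem pvEnumerate_map {α β : Type} (h : α → β) (xs : List α) (s : Int) :
    PySem.List.enumerate (xs.map h) s = (PySem.List.enumerate xs s).map (fun p => (p.1, h p.2)) := by
  induction xs generalizing s with
  | nil => simp
  | cons x xs ih =>
    simp only [List.map_cons]
    rw [PySem.List.enumerate_cons, PySem.List.enumerate_cons, ih]
    simp

-- ===== VERDICT (by name: the statement is the Claim_ definition above) =====
theorem pvA_items (d : List (String × List Int)) :
    product_with_map d
      = (PySem.List.enumerate (pvProdTuples (d.map Prod.snd)) 0).map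
          (fun p => (p.1 + 1,
            ((PySem.List.pyRange 0 ((d.map Prod.fst).length : Int) 1).foldl
              (fun (c : PySem.Dict String Int) j =>
                c.insert (PySem.List.pyGetD (d.map Prod.fst) j "")
                  (PySem.List.pyGetD p.2 j 0))
              PySem.Dict.empty).items)) := by
  simp only [product_with_map]
  set args := d.map Prod.fst with hargs
  set vals := pvProdTuples (d.map Prod.snd) with hvals
  have hfold :
      (PySem.List.pyRange 0 ((vals.length : Int)) 1).foldl
        (fun (res : PySem.Dict Int (PySem.Dict String Int)) id_ =>
          res.insert (id_ + 1)
            ((PySem.List.pyRange 0 ((args.length : Int)) 1).foldl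
              (fun (c : PySem.Dict String Int) j =>
                c.insert (PySem.List.pyGetD args j "")
                  (PySem.List.pyGetD (PySem.List.pyGetD vals id_ []) j 0))
              PySem.Dict.empty))
        PySem.Dict.empty
      = (PySem.List.enumerate vals 0).foldl
          (fun (res : PySem.Dict Int (PySem.Dict String Int)) p =>
            res.insert (p.1 + 1)
              ((PySem.List.pyRange 0 ((args.length : Int)) 1).foldl
                (fun (c : PySem.Dict String Int) j =>
                  c.insert (PySem.List.pyGetD args j "")
                    (PySem.List.pyGetD p.2 j 0))
                PySem.Dict.empty))
          PySem.Dict.empty := by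
    rw [PySem.List.enumerate_eq_map_pyRange vals [], List.foldl_map]
    rfl
  rw [hfold, PySem.Dict.items_foldl_insert_fresh _ _ _ _ ?_ ?_]
  · simp [PySem.Dict.empty, Function.comp_def]
  · intro a _
    simp [PySem.Dict.contains_empty]
  · have : (PySem.List.enumerate vals 0).map (fun p => p.1 + 1)
        = (PySem.List.pyRange 0 (0 + (vals.length : Int)) 1).map (fun j => j + 1) := by
      rw [← PySem.List.map_fst_enumerate vals 0, List.map_map]
      rfl
    rw [this]
    exact (PySem.List.nodup_pyRange_one 0 (0 + (vals.length : Int))).map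
      (fun a b h => by omega)

theorem pvB_items (d : List (String × List Int)) :
    product_with_map_alt d
      = (PySem.List.enumerate (pvProdTuples (d.map Prod.snd)) 0).map
          (fun p => (p.1 + 1,
            (pvInsZip PySem.Dict.empty ((d.map Prod.fst).zip p.2)).items)) := by
  unfold product_with_map_alt
  rw [pvRunning_eq]
  simp only [List.flatMap_cons, List.flatMap_nil, List.append_nil]
  rw [pvBuildAll_eq, show (1 : Int) = 0 + 1 from rfl, pvEnumerate_shift, pvEnumerate_map]
  simp [List.map_map]

theorem product_with_map_spec : Claim_equal_product_with_map := by
  intro d _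
  show product_with_map d = product_with_map_alt d
  rw [pvA_items, pvB_items]
  refine List.map_congr_left ?_
  intro p hp
  have hmem : p.2 ∈ pvProdTuples (d.map Prod.snd) := by
    rw [PySem.List.mem_enumerate_iff] at hp
    obtain ⟨k, hk, rfl⟩ := hp
    exact List.getElem_mem hk
  have hlen : p.2.length = (d.map Prod.fst).length := by
    rw [pvProdTuples_length _ _ hmem]
    simp
  rw [pvInner_eq (d.map Prod.fst) p.2 hlen]
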